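-- pv_equiv track=rewrite | github.com/vladdumitru46/Facultate | Artificial intelligence/Tema1/problema4/solution.py | solution
-- ===== SOURCE A (Python) =====
-- def solution(a):
--     fr = {}
--     l = a.split(" ")
--     for i in l:
--         fr[i] = 0
--     for i in l:
--         fr[i] = fr[i] + 1
--     rez = []
--     for i in fr:
--         if fr[i] == 1:
--             rez.append(i)
--     return rez
-- ===== SOURCE B (Python) =====
-- def solution(a):
--     def go(l):
--         if not l:
--             return []
--         w, rest = l[0], l[1:]
--         if w in rest:
--             return go([x for x in rest if x != w])
--         return [w] + go(rest)
--     return go(a.split(" "))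
-- ===== Notes on version B (the rewrite author's own statement) =====
-- stated objective: alternative
-- what changed: Replaces the dict-counting passes with a recursive algorithm that takes the head word, tests membership in the tail, and either deletes every occurrence of it before recursing (duplicate) or emits it and recurses (unique); no counts or tables are ever kept.
import Mathlib
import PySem

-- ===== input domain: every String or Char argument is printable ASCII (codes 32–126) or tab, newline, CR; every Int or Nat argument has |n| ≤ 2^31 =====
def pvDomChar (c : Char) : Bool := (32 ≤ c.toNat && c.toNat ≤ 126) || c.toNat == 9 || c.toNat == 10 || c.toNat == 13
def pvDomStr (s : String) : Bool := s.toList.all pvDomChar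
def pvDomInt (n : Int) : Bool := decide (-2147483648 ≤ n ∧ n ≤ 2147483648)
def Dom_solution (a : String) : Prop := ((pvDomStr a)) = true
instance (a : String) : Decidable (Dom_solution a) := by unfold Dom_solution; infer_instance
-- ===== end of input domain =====

-- B replaces A's frequency dictionary with a recursive head-word algorithm: a duplicated head is
-- deleted everywhere before recursing, a unique head is emitted; same return values.

-- ===== PORT A =====
-- sep is the nonempty literal " ", so split? is always some; the .getD [] branch is unreachable
-- literal port: build fr by two loops (zero then increment), then collect keys with count 1
-- (fr[i] in the loops is a present-key lookup, ported as getD with default 0)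
def solution (a : String) : List String :=
  let l := (PySem.Str.split? a " ").getD []
  let fr0 := l.foldl (fun d i => d.insert i (0 : Int)) PySem.Dict.empty
  let fr := l.foldl (fun d i => d.insert i (d.getD i 0 + 1)) fr0
  fr.keys.foldl (fun rez i => if fr.getD i 0 == 1 then rez ++ [i] else rez) []

-- ===== PORT B =====
-- port of Source B's inner recursive helper `go`
def goAlt : List String → List String
  | [] => []
  | w :: rest =>
    if w ∈ rest then goAlt (rest.filter (fun x => x ≠ w))
    else w :: goAlt rest
termination_by l => l.length
decreasing_by
  · simpa using Nat.lt_succ_of_le (le_trans (List.length_filter_le _ rest.attach) (le_of_eq List.length_attach))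
  · simp

def solution_alt (a : String) : List String :=
  goAlt ((PySem.Str.split? a " ").getD [])

-- ===== PRECONDITION & SPEC =====
def Spec_solution (a : String) (out : List String) : Prop := out = solution_alt a
instance (a : String) (out : List String) : Decidable (Spec_solution a out) := by unfold Spec_solution; infer_instance

-- ===== CLAIM (what is proved, stated in full; the proofs are below) =====
def Claim_equal_solution : Prop := ∀ (a : String), Dom_solution a → Spec_solution a (solution a)

-- ===== LEMMAS AND PROOFS =====

-- A-SIDE: A's pipeline equals the once-only filter -----------------------------------------

-- the zero-initialising loop leaves every getD-with-default-0 lookup at 0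
lemma getD_foldl_insert_zero {κ : Type} [BEq κ] [LawfulBEq κ] [DecidableEq κ]
    (l : List κ) (d : PySem.Dict κ Int) (v : κ) (h : d.getD v 0 = 0) :
    (l.foldl (fun d i => d.insert i (0 : Int)) d).getD v 0 = 0 := by
  induction l generalizing d with
  | nil => simpa using h
  | cons x xs ih =>
    simp only [List.foldl_cons]
    apply ih
    rw [PySem.Dict.getD_insert]
    split_ifs with hx
    · rfl
    · exact h

-- in A's fr, every lookup is the count of the word in l
lemma getD_fr (l : List String) (v : String) :
    ((l.foldl (fun d i => d.insert i (d.getD i 0 + 1))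
        (l.foldl (fun d i => d.insert i (0 : Int)) PySem.Dict.empty)).getD v 0)
      = (l.count v : Int) := by
  rw [PySem.Dict.getD_foldl_insert_add_one]
  rw [getD_foldl_insert_zero l PySem.Dict.empty v (by simp)]
  ring

-- updating a set with elements it already contains changes nothing
lemma update_self_of_subset {α : Type} [BEq α] [LawfulBEq α]
    (s : PySem.Set α) (xs : List α) (h : ∀ x ∈ xs, x ∈ s) :
    PySem.Set.update s xs = s := by
  rw [PySem.Set.update_eq_append_filter]
  have hnil : List.filter (fun y => !s.contains y) (PySem.Set.ofList xs) = [] :=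
    List.filter_eq_nil_iff.mpr (fun y hy => by
      have hm : y ∈ s := h y ((PySem.Set.mem_ofList xs y).mp hy)
      simpa using hm)
  rw [hnil, List.append_nil]

-- fr's keys are the distinct words of l in first-occurrence order
lemma keys_fr (l : List String) :
    ((l.foldl (fun d i => d.insert i (d.getD i 0 + 1))
        (l.foldl (fun d i => d.insert i (0 : Int)) PySem.Dict.empty)).keys)
      = PySem.Set.ofList l := by
  rw [PySem.Dict.keys_foldl_insert, PySem.Dict.keys_foldl_insert]
  have h0 : PySem.Set.update (PySem.Dict.empty : PySem.Dict String Int).keys l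
      = PySem.Set.ofList l := by
    simp [PySem.Dict.empty, PySem.Dict.keys, PySem.Set.update_nil_left]
  rw [h0]
  exact update_self_of_subset _ _ (fun x hx => (PySem.Set.mem_ofList l x).mpr hx)

-- filtering the deduplicated list by a predicate that forces count ≤ 1
-- gives the same as filtering the original list
lemma filter_ofList_eq_filter {α : Type} [BEq α] [LawfulBEq α] [DecidableEq α]
    (l : List α) (p : α → Bool) (h : ∀ x, p x = true → l.count x ≤ 1) :
    (PySem.Set.ofList l).filter p = l.filter p := by
  induction l with
  | nil => simp [PySem.Set.ofList_nil]
  | cons x xs ih =>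
    have hxs : ∀ y, p y = true → xs.count y ≤ 1 := by
      intro y hy
      have := h y hy
      have hc : xs.count y ≤ (x :: xs).count y := by
        by_cases hxy : x = y <;> simp [hxy]
      omega
    rw [PySem.Set.ofList_cons]
    by_cases hp : p x = true
    · have hx1 : (x :: xs).count x ≤ 1 := h x hp
      have hnot : x ∉ xs := by
        intro hmem
        have : 1 ≤ xs.count x := List.one_le_count_iff.mpr hmem
        simp [List.count_cons_self] at hx1
        omega
      have hdis : (PySem.Set.ofList xs).discard x = PySem.Set.ofList xs := by
        unfold PySem.Set.discard
        apply List.filter_eq_self.mpr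
        intro y hy
        have : y ∈ xs := (PySem.Set.mem_ofList xs y).mp hy
        have : y ≠ x := fun he => hnot (he ▸ this)
        simp [this]
      simp only [List.filter_cons, hp, hdis, ih hxs]
    · have hfd : ((PySem.Set.ofList xs).discard x).filter p
          = (PySem.Set.ofList xs).filter p := by
        unfold PySem.Set.discard
        rw [List.filter_filter]
        apply List.filter_congr
        intro y _
        by_cases hyx : y = x
        · subst hyx; simp [hp]
        · simp [hyx]
      simp only [List.filter_cons, hp, hfd, ih hxs]

-- A's whole pipeline, stated over an arbitrary word list
lemma coreA (l : List String) :
    ((l.foldl (fun d i => d.insert i (d.getD i 0 + 1))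
        (l.foldl (fun d i => d.insert i (0 : Int)) PySem.Dict.empty)).keys.foldl
      (fun rez i =>
        if (l.foldl (fun d i => d.insert i (d.getD i 0 + 1))
            (l.foldl (fun d i => d.insert i (0 : Int)) PySem.Dict.empty)).getD i 0 == 1
        then rez ++ [i] else rez) [])
      = l.filter (fun w => l.count w == 1) := by
  rw [keys_fr]
  have hfold := PySem.List.foldl_append_if
    (fun i => (l.foldl (fun d i => d.insert i (d.getD i 0 + 1))
        (l.foldl (fun d i => d.insert i (0 : Int)) PySem.Dict.empty)).getD i 0 == 1)
    (fun i : String => i) (PySem.Set.ofList l) []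
  rw [hfold]
  simp only [List.map_id_fun', id_eq, List.nil_append]
  have hcong : (PySem.Set.ofList l).filter
      (fun i => (l.foldl (fun d i => d.insert i (d.getD i 0 + 1))
        (l.foldl (fun d i => d.insert i (0 : Int)) PySem.Dict.empty)).getD i 0 == 1)
      = (PySem.Set.ofList l).filter (fun w => l.count w == 1) := by
    apply List.filter_congr
    intro y _
    rw [getD_fr]
    by_cases hc : l.count y = 1 <;> simp [hc]
  rw [hcong]
  apply filter_ofList_eq_filter
  intro y hy
  have : l.count y = 1 := by simpa using hy
  omega

-- B-SIDE: the recursive helper also equals the once-only filter ----------------------------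

lemma goAlt_eq_aux : ∀ (n : Nat) (l : List String), l.length ≤ n →
    goAlt l = l.filter (fun w => l.count w == 1) := by
  intro n
  induction n with
  | zero =>
    intro l h
    have : l = [] := List.eq_nil_of_length_eq_zero (Nat.le_zero.mp h)
    subst this; rw [goAlt]; rfl
  | succ n ih =>
    intro l h
    match l with
    | [] => rw [goAlt]; rfl
    | w :: rest =>
      have hlen : rest.length ≤ n := by simpa using h
      rw [goAlt]
      by_cases hmem : w ∈ rest
      · rw [if_pos hmem,
          ih (rest.filter (fun x => x ≠ w)) (le_trans (List.length_filter_le _ _) hlen)]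
        have hw2 : ((w :: rest).count w == 1) = false := by
          have : 1 ≤ rest.count w := List.one_le_count_iff.mpr hmem
          simp [List.count_cons_self]; omega
        simp only [List.filter_cons, hw2, Bool.false_eq_true, if_false]
        -- filter of rest by the cons-count predicate = filter of (rest minus w) by its own count
        have step1 : rest.filter (fun x => (w :: rest).count x == 1)
            = (rest.filter (fun x => x ≠ w)).filter (fun x => (w :: rest).count x == 1) := by
          rw [List.filter_filter]
          apply List.filter_congr
          intro y _
          by_cases hyw : y = w
          · subst hyw; simp only [hw2]; simp
          · simp [hyw]
        rw [step1]
        apply List.filter_congr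
        intro y hy
        have hyw : y ≠ w := by
          have := List.of_mem_filter hy
          simpa using this
        have hcnt : (rest.filter (fun x => x ≠ w)).count y = (w :: rest).count y := by
          rw [List.count_filter (by simpa using hyw)]
          simp [Ne.symm hyw]
        rw [hcnt]
      · rw [if_neg hmem, ih rest hlen]
        have hw1 : ((w :: rest).count w == 1) = true := by
          have : rest.count w = 0 := List.count_eq_zero.mpr hmem
          simp [List.count_cons_self, this]
        simp only [List.filter_cons, hw1, if_true]
        congr 1
        apply List.filter_congr
        intro y hy
        have hyw : y ≠ w := fun he => hmem (he ▸ hy)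
        simp [Ne.symm hyw]

lemma goAlt_eq (l : List String) :
    goAlt l = l.filter (fun w => l.count w == 1) :=
  goAlt_eq_aux l.length l (le_refl _)

-- ===== VERDICT (by name: the statement is the Claim_ definition above) =====
theorem solution_spec : Claim_equal_solution := by
  intro a _
  show solution a = solution_alt a
  unfold solution solution_alt
  rw [goAlt_eq]
  exact coreA ((PySem.Str.split? a " ").getD [])
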